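-- pv_equiv track=rewrite | github.com/doncieux/python_scripts | sferes_data/restructure_data.py | merge_run_data
-- ===== SOURCE A (Python) =====
-- def merge_run_data(data,col_num_main=0):
--     """Restructure the data from a list of data corresponding to a set of files into a structure that merges the data for each file. The returned value is a dictionary that associates a list of values to each main col value.
--     """
--
--     nb_cols=len(data[0][0])
--     ndata={}
--     for col in range(nb_cols):
--         if (col == col_num_main):
--             continue
--         ndata[col]={}
--
--         for f in range(len(data)):
--             for l in range(len(data[f])):
--                 if (data[f][l][col_num_main] in ndata[col].keys()):
--                     ndata[col][data[f][l][col_num_main]].append(data[f][l][col])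
--                 else:
--                     ndata[col][data[f][l][col_num_main]]=[data[f][l][col]]
--
--     return ndata
-- ===== SOURCE B (Python) =====
-- def merge_run_data(data, col_num_main=0):
--     """Two-phase algorithm: first group the whole rows by their main-column key
--     in a single scan of the data, then project each non-main column out of the
--     grouped rows without touching the data again."""
--     nb_cols = len(data[0][0])
--     cols = [c for c in range(nb_cols) if c != col_num_main]
--     if not cols:
--         return {}
--     groups = {}
--     for rows in data:
--         for row in rows:
--             groups.setdefault(row[col_num_main], []).append(row)
--     return {c: {k: [row[c] for row in rws] for k, rws in groups.items()}
--             for c in cols}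
-- ===== Notes on version B (the rewrite author's own statement) =====
-- stated objective: alternative
-- what changed: B replaces A's per-column rescans of the whole data (rebuilding the key grouping nb_cols times) by a two-phase algorithm: one scan groups the entire rows by their main-column key, then each output column is projected out of that single grouping without touching the data again.
import Mathlib
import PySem

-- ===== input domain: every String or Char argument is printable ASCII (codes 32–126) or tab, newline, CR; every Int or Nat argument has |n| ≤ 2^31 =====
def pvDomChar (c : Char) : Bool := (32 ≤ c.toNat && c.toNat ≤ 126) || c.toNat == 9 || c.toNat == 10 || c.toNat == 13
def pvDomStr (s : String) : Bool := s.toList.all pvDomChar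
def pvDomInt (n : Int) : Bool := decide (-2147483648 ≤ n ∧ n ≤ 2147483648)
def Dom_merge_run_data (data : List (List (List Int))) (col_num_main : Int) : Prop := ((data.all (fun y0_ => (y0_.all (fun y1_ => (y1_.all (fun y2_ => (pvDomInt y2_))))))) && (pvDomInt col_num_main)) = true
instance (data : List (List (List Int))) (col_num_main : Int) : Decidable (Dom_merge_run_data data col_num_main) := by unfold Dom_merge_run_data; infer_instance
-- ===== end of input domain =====

-- B replaces A's one-scan-per-column grouping by a two-phase algorithm (group rows once, then project columns); return values proved equal.

-- ===== PORT A =====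
def merge_run_data (data : List (List (List Int))) (col_num_main : Int) : List (Int × List (Int × List Int)) :=
  let nb_cols : Int := ((PySem.List.pyGetD (PySem.List.pyGetD data 0 []) 0 []).length : Int)
  let ndata : PySem.Dict Int (PySem.Dict Int (List Int)) :=
    (PySem.List.pyRange 0 nb_cols 1).foldl (fun nd col =>
      if col == col_num_main then nd
      else
        let nd := nd.insert col PySem.Dict.empty
        (PySem.List.pyRange 0 (data.length : Int) 1).foldl (fun nd f =>
          (PySem.List.pyRange 0 ((PySem.List.pyGetD data f []).length : Int) 1).foldl (fun nd l =>
            let row := PySem.List.pyGetD (PySem.List.pyGetD data f []) l []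
            let key := PySem.List.pyGetD row col_num_main 0
            let inner := nd.getD col PySem.Dict.empty
            if inner.contains key then
              nd.insert col (inner.modify key [] (fun v => v ++ [PySem.List.pyGetD row col 0]))
            else
              nd.insert col (inner.insert key [PySem.List.pyGetD row col 0])) nd) nd)
      PySem.Dict.empty
  ndata.items.map (fun p => (p.1, p.2.items))

-- ===== PORT B =====
def merge_run_data_alt (data : List (List (List Int))) (col_num_main : Int) : List (Int × List (Int × List Int)) :=
  let nb_cols : Int := ((PySem.List.pyGetD (PySem.List.pyGetD data 0 []) 0 []).length : Int)
  let cols : List Int := (PySem.List.pyRange 0 nb_cols 1).filter (fun c => c != col_num_main)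
  if cols.isEmpty then []
  else
    -- phase 1: group whole rows by their main-column key, one scan of the data
    let groups : PySem.Dict Int (List (List Int)) :=
      data.foldl (fun g rows =>
        rows.foldl (fun g row =>
          let k := PySem.List.pyGetD row col_num_main 0
          (g.setdefault k []).modify k [] (fun v => v ++ [row])) g) PySem.Dict.empty
    -- phase 2: project each non-main column out of the grouped rows
    let ndata : PySem.Dict Int (PySem.Dict Int (List Int)) :=
      cols.foldl (fun d c =>
        d.insert c (groups.items.foldl (fun inner p =>
          inner.insert p.1 (p.2.map (fun row => PySem.List.pyGetD row c 0))) PySem.Dict.empty)) PySem.Dict.empty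
    ndata.items.map (fun p => (p.1, p.2.items))

-- ===== PRECONDITION & SPEC =====
-- Pre_ excludes exactly the inputs on which A raises IndexError: empty data / empty first
-- file (data[0][0] fails), and — when at least one non-main column exists — any row too
-- short for a scanned column or for which col_num_main is not a valid Python index.
def Pre_merge_run_data (data : List (List (List Int))) (col_num_main : Int) : Prop :=
  data ≠ [] ∧ data.headD [] ≠ [] ∧
  ((∃ c ∈ List.range ((data.headD []).headD []).length, (c : Int) ≠ col_num_main) →
    ∀ file ∈ data, ∀ row ∈ file,
      (-(row.length : Int) ≤ col_num_main ∧ col_num_main < (row.length : Int)) ∧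
      ∀ c ∈ List.range ((data.headD []).headD []).length, (c : Int) ≠ col_num_main → c < row.length)
instance (data : List (List (List Int))) (col_num_main : Int) : Decidable (Pre_merge_run_data data col_num_main) := by unfold Pre_merge_run_data; infer_instance

def pvWitness_merge_run_data : List (List (List Int)) × Int := ([[[1, 2], [3, 4]], [[5, 6]]], 0)

def Spec_merge_run_data (data : List (List (List Int))) (col_num_main : Int) (out : List (Int × List (Int × List Int))) : Prop := out = merge_run_data_alt data col_num_main
instance (data : List (List (List Int))) (col_num_main : Int) (out : List (Int × List (Int × List Int))) : Decidable (Spec_merge_run_data data col_num_main out) := by unfold Spec_merge_run_data; infer_instance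

-- ===== CLAIM (what is proved, stated in full; the proofs are below) =====
def Claim_equal_merge_run_data : Prop := ∀ (data : List (List (List Int))) (col_num_main : Int), Dom_merge_run_data data col_num_main → Pre_merge_run_data data col_num_main → Spec_merge_run_data data col_num_main (merge_run_data data col_num_main)

-- ===== LEMMAS AND PROOFS =====

-- The per-row update A performs on a column's group dict.
def pvRow (m c : Int) (inner : PySem.Dict Int (List Int)) (row : List Int) : PySem.Dict Int (List Int) :=
  let key := PySem.List.pyGetD row m 0
  if inner.contains key then inner.modify key [] (fun v => v ++ [PySem.List.pyGetD row c 0])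
  else inner.insert key [PySem.List.pyGetD row c 0]

def pvGroup (m c : Int) (rows : List (List Int)) : PySem.Dict Int (List Int) :=
  rows.foldl (pvRow m c) PySem.Dict.empty

-- B's row-grouping step and its dict.
def pvGStep (m : Int) (g : PySem.Dict Int (List (List Int))) (row : List Int) : PySem.Dict Int (List (List Int)) :=
  let k := PySem.List.pyGetD row m 0
  (g.setdefault k []).modify k [] (fun v => v ++ [row])

def pvGroups (m : Int) (rows : List (List Int)) : PySem.Dict Int (List (List Int)) :=
  rows.foldl (pvGStep m) PySem.Dict.empty

theorem pv_sd_modify {ν : Type} (g : PySem.Dict Int (List ν)) (k : Int) (f : List ν → List ν) :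
    (g.setdefault k []).modify k [] f = g.modify k [] f := by
  by_cases h : g.contains k = true
  · rw [PySem.Dict.setdefault_of_contains g [] h]
  · rw [PySem.Dict.setdefault_of_not_contains g [] (by simpa using h)]
    simp only [PySem.Dict.modify, PySem.Dict.getD_insert_self, PySem.Dict.insert_insert_self]
    rw [PySem.Dict.getD_of_not_contains g [] (by simpa using h)]

theorem pv_row_modify (m c : Int) (g : PySem.Dict Int (List Int)) (row : List Int) :
    pvRow m c g row = g.modify (PySem.List.pyGetD row m 0) [] (fun v => v ++ [PySem.List.pyGetD row c 0]) := by
  unfold pvRow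
  by_cases h : g.contains (PySem.List.pyGetD row m 0) = true
  · simp [h]
  · simp only [h, if_neg, Bool.false_eq_true, not_false_iff, PySem.Dict.modify]
    rw [PySem.Dict.getD_of_not_contains g [] (by simpa using h)]
    rfl

theorem pv_gstep_modify (m : Int) (g : PySem.Dict Int (List (List Int))) (row : List Int) :
    pvGStep m g row = g.modify (PySem.List.pyGetD row m 0) [] (fun v => v ++ [row]) := by
  unfold pvGStep
  exact pv_sd_modify g _ _

-- generic: a modify-append loop keyed by `key`, written as a loop over pairs
theorem pv_fold_pairs {α : Type} (rows : List (List Int)) (key : List Int → Int) (F : List Int → α)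
    (d : PySem.Dict Int (List α)) :
    rows.foldl (fun g r => g.modify (key r) [] (fun v => v ++ [F r])) d
      = (rows.map (fun r => (key r, F r))).foldl (fun g p => g.modify p.1 [] (fun v => v ++ [p.2])) d := by
  rw [List.foldl_map]

theorem pv_fold_getD {α : Type} (rows : List (List Int)) (key : List Int → Int) (F : List Int → α) (k : Int) :
    (rows.foldl (fun g r => g.modify (key r) [] (fun v => v ++ [F r])) PySem.Dict.empty).getD k []
      = (rows.filter (fun r => key r == k)).map F := by
  rw [pv_fold_pairs, PySem.Dict.getD_foldl_modify_append]
  simp [List.filter_map, Function.comp_def]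

theorem pv_fold_keys {α : Type} (rows : List (List Int)) (key : List Int → Int) (F : List Int → α) :
    (rows.foldl (fun g r => g.modify (key r) [] (fun v => v ++ [F r])) PySem.Dict.empty).keys
      = PySem.Set.update ((PySem.Dict.empty : PySem.Dict Int (List α)).keys) (rows.map key) := by
  exact PySem.Dict.keys_foldl_modify_key rows key [] (fun _ r v => v ++ [F r]) (PySem.Dict.empty : PySem.Dict Int (List α))

theorem pv_fold_nodup {α : Type} (rows : List (List Int)) (key : List Int → Int) (F : List Int → α) :
    (rows.foldl (fun g r => g.modify (key r) [] (fun v => v ++ [F r])) PySem.Dict.empty).keys.Nodup := by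
  exact PySem.Dict.nodup_keys_foldl_modify_key rows key [] (fun _ r v => v ++ [F r]) (PySem.Dict.empty : PySem.Dict Int (List α))
    (by simp [PySem.Dict.keys_empty])

-- pvGroup's items are the projection of pvGroups' items
theorem pv_group_items (m c : Int) (rows : List (List Int)) :
    (pvGroup m c rows).items
      = (pvGroups m rows).items.map (fun p => (p.1, p.2.map (fun row => PySem.List.pyGetD row c 0))) := by
  have hA : pvGroup m c rows
      = rows.foldl (fun g r => g.modify (PySem.List.pyGetD r m 0) [] (fun v => v ++ [PySem.List.pyGetD r c 0])) PySem.Dict.empty := by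
    unfold pvGroup
    congr 1
    funext g r
    exact pv_row_modify m c g r
  have hB : pvGroups m rows
      = rows.foldl (fun g r => g.modify (PySem.List.pyGetD r m 0) [] (fun v => v ++ [r])) PySem.Dict.empty := by
    unfold pvGroups
    congr 1
    funext g r
    exact pv_gstep_modify m g r
  rw [hA, hB,
    PySem.Dict.items_eq_map_keys _ (pv_fold_nodup rows (fun r => PySem.List.pyGetD r m 0) (fun r => PySem.List.pyGetD r c 0)) [],
    PySem.Dict.items_eq_map_keys _ (pv_fold_nodup rows (fun r => PySem.List.pyGetD r m 0) (fun r => r)) [],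
    pv_fold_keys, pv_fold_keys, List.map_map]
  apply List.map_congr_left
  intro k _
  simp [pv_fold_getD]

-- B's inner dict comprehension over groups' (distinct) keys appends the mapped items
theorem pv_project_items (c : Int) (g : PySem.Dict Int (List (List Int))) (hnd : g.keys.Nodup) :
    (g.items.foldl (fun inner p =>
        inner.insert p.1 (p.2.map (fun row => PySem.List.pyGetD row c 0))) PySem.Dict.empty).items
      = g.items.map (fun p => (p.1, p.2.map (fun row => PySem.List.pyGetD row c 0))) := by
  rw [PySem.Dict.items_foldl_insert_fresh g.items (fun p => p.1)
      (fun p => p.2.map (fun row => PySem.List.pyGetD row c 0)) PySem.Dict.empty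
      (fun a _ => PySem.Dict.contains_empty a.1) (by simpa [PySem.Dict.keys] using hnd)]
  rfl

theorem pv_loop_insert (c : Int) (h : PySem.Dict Int (List Int) → List Int → PySem.Dict Int (List Int))
    (rows : List (List Int)) (nd : PySem.Dict Int (PySem.Dict Int (List Int))) (x : PySem.Dict Int (List Int)) :
    rows.foldl (fun nd row => nd.insert c (h (nd.getD c PySem.Dict.empty) row)) (nd.insert c x)
      = nd.insert c (rows.foldl h x) := by
  induction rows generalizing x with
  | nil => rfl
  | cons r rs ih =>
    simp only [List.foldl_cons, PySem.Dict.getD_insert_self, PySem.Dict.insert_insert_self]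
    exact ih (h x r)

theorem pv_A_scan {β : Type} (data : List (List (List Int))) (G : β → List Int → β) (init : β) :
    (PySem.List.pyRange 0 (data.length : Int)).foldl
      (fun acc f => (PySem.List.pyRange 0 ((PySem.List.pyGetD data f []).length : Int)).foldl
        (fun acc l => G acc (PySem.List.pyGetD (PySem.List.pyGetD data f []) l [])) acc) init
    = data.flatten.foldl G init := by
  rw [PySem.List.foldl_pyRange_zero_pyGetD' data []
      (fun acc file => (PySem.List.pyRange 0 (file.length : Int)).foldl
        (fun acc l => G acc (PySem.List.pyGetD file l [])) acc) init,
    List.foldl_flatten]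
  congr 1
  funext acc file
  exact PySem.List.foldl_pyRange_zero_pyGetD' file [] G acc

theorem pv_cols_filter {β : Type} (m : Int) (cols : List Int) (F : β → Int → β) (init : β) :
    (cols.filter (fun c => c != m)).foldl F init
      = cols.foldl (fun nd c => if c == m then nd else F nd c) init := by
  rw [List.foldl_filter]
  congr 1
  funext nd c
  by_cases h : c = m <;> simp [h]

theorem pv_main (data : List (List (List Int))) (m : Int) :
    merge_run_data data m = merge_run_data_alt data m := by
  unfold merge_run_data merge_run_data_alt
  simp only []
  set nb : Int := ((PySem.List.pyGetD (PySem.List.pyGetD data 0 []) 0 []).length : Int) with hnb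
  set cols : List Int := PySem.List.pyRange 0 nb 1 with hcols
  set colsF : List Int := cols.filter (fun c => c != m) with hcolsF
  -- A's dict equals colsF.foldl (insert of per-column groups of the flattened data)
  have hA : cols.foldl (fun nd col =>
      if col == m then nd
      else
        (PySem.List.pyRange 0 (data.length : Int)).foldl (fun nd f =>
          (PySem.List.pyRange 0 ((PySem.List.pyGetD data f []).length : Int)).foldl (fun nd l =>
            let row := PySem.List.pyGetD (PySem.List.pyGetD data f []) l []
            let key := PySem.List.pyGetD row m 0
            let inner := nd.getD col PySem.Dict.empty
            if inner.contains key then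
              nd.insert col (inner.modify key [] (fun v => v ++ [PySem.List.pyGetD row col 0]))
            else
              nd.insert col (inner.insert key [PySem.List.pyGetD row col 0])) nd)
          (nd.insert col PySem.Dict.empty)) PySem.Dict.empty
      = colsF.foldl (fun nd c => nd.insert c (pvGroup m c data.flatten)) PySem.Dict.empty := by
    rw [hcolsF, pv_cols_filter]
    congr 1
    funext nd col
    by_cases h : (col == m) = true
    · simp only [h, if_pos]
    · simp only [h, if_neg, Bool.false_eq_true, not_false_iff]
      rw [pv_A_scan data (fun nd row =>
            let key := PySem.List.pyGetD row m 0
            let inner := nd.getD col PySem.Dict.empty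
            if inner.contains key then
              nd.insert col (inner.modify key [] (fun v => v ++ [PySem.List.pyGetD row col 0]))
            else
              nd.insert col (inner.insert key [PySem.List.pyGetD row col 0]))
          (nd.insert col PySem.Dict.empty)]
      have hstep : (fun (nd : PySem.Dict Int (PySem.Dict Int (List Int))) (row : List Int) =>
            let key := PySem.List.pyGetD row m 0
            let inner := nd.getD col PySem.Dict.empty
            if inner.contains key then
              nd.insert col (inner.modify key [] (fun v => v ++ [PySem.List.pyGetD row col 0]))
            else
              nd.insert col (inner.insert key [PySem.List.pyGetD row col 0]))
          = (fun nd row => nd.insert col (pvRow m col (nd.getD col PySem.Dict.empty) row)) := by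
        funext nd row
        simp only [pvRow]
        by_cases hc : (nd.getD col PySem.Dict.empty).contains (PySem.List.pyGetD row m 0) = true <;>
          simp [hc]
      rw [hstep, pv_loop_insert col (pvRow m col) data.flatten nd PySem.Dict.empty]
      rfl
  rw [hA]
  by_cases hemp : colsF.isEmpty = true
  · rw [if_pos hemp]
    have : colsF = [] := List.isEmpty_iff.mp hemp
    rw [this]
    rfl
  · rw [if_neg hemp]
    -- B's groups dict is pvGroups of the flattened data
    have hG : data.foldl (fun g rows =>
        rows.foldl (fun g row =>
          let k := PySem.List.pyGetD row m 0
          (g.setdefault k []).modify k [] (fun v => v ++ [row])) g) PySem.Dict.empty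
        = pvGroups m data.flatten := by
      rw [← List.foldl_flatten]
      rfl
    rw [hG]
    -- inner dicts coincide, hence the whole foldl does
    have hnd : (pvGroups m data.flatten).keys.Nodup := by
      have hB : pvGroups m data.flatten
          = data.flatten.foldl (fun g r => g.modify (PySem.List.pyGetD r m 0) [] (fun v => v ++ [r])) PySem.Dict.empty := by
        unfold pvGroups
        congr 1
        funext g r
        exact pv_gstep_modify m g r
      rw [hB]
      exact pv_fold_nodup data.flatten (fun r => PySem.List.pyGetD r m 0) (fun r => r)
    have hfun : (fun (d : PySem.Dict Int (PySem.Dict Int (List Int))) c =>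
        d.insert c ((pvGroups m data.flatten).items.foldl (fun inner p =>
          inner.insert p.1 (p.2.map (fun row => PySem.List.pyGetD row c 0))) PySem.Dict.empty))
        = (fun d c => d.insert c (pvGroup m c data.flatten)) := by
      funext d c
      congr 1
      apply PySem.Dict.ext
      rw [pv_project_items c (pvGroups m data.flatten) hnd, ← pv_group_items m c data.flatten]
    rw [hfun]

-- ===== VERDICT (by name: the statement is the Claim_ definition above) =====
theorem merge_run_data_spec : Claim_equal_merge_run_data := by
  intro data m _ _
  exact pv_main data m
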